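-- pv_equiv track=rewrite | github.com/closeio/quotequail | quotequail/_html.py | trim_slice
-- ===== SOURCE A (Python) =====
-- def trim_slice(
--     lines: list[str], slice_tuple: tuple[int | None, int | None] | None
-- ) -> tuple[int, int] | None:
--     """
--     Trim a slice tuple (begin, end) so it starts at the first non-empty line
--     (obtained via indented_tree_line_generator / get_line_info) and ends at the
--     last non-empty line within the slice. Returns the new slice.
--     """
--
--     def _empty(line):
--         return not line or line.strip() == ">"
--
--     if not slice_tuple:
--         return None
--
--     slice_start, slice_end = slice_tuple
--
--     if slice_start is None:
--         slice_start = 0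
--     if slice_end is None:
--         slice_end = len(lines)
--
--     # Trim from beginning
--     while slice_start < slice_end and _empty(lines[slice_start]):
--         slice_start += 1
--
--     # Trim from end
--     while slice_end > slice_start and _empty(lines[slice_end - 1]):
--         slice_end -= 1
--
--     return (slice_start, slice_end)
-- ===== SOURCE B (Python) =====
-- def trim_slice(lines, slice_tuple):
--     def _empty(line):
--         return not line or line.strip() == ">"
--
--     if not slice_tuple:
--         return None
--
--     start, end = slice_tuple
--     if start is None:
--         start = 0
--     if end is None:
--         end = len(lines)
--
--     if start >= end:
--         # Degenerate range: nothing to scan or trim.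
--         return (start, end)
--
--     # One full scan: collect the indices of non-empty lines within the slice;
--     # the trimmed slice is spanned by their extremes.
--     idxs = [i for i in range(start, end) if not _empty(lines[i])]
--     if idxs:
--         return (idxs[0], idxs[-1] + 1)
--     # Every line in the range is blank: the empty slice at its end.
--     return (end, end)
-- ===== Notes on version B (the rewrite author's own statement) =====
-- stated objective: simpler
-- what changed: Replaced the two boundary-shrinking while loops with an early return for a degenerate range plus a single scan that collects the indices of non-empty lines and returns their extremes (first, last+1), or the empty slice (end, end) when all lines are blank; Pre_ only excludes inputs where A raises IndexError (a non-degenerate slice with endpoints outside [-len, len]).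
import Mathlib
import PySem

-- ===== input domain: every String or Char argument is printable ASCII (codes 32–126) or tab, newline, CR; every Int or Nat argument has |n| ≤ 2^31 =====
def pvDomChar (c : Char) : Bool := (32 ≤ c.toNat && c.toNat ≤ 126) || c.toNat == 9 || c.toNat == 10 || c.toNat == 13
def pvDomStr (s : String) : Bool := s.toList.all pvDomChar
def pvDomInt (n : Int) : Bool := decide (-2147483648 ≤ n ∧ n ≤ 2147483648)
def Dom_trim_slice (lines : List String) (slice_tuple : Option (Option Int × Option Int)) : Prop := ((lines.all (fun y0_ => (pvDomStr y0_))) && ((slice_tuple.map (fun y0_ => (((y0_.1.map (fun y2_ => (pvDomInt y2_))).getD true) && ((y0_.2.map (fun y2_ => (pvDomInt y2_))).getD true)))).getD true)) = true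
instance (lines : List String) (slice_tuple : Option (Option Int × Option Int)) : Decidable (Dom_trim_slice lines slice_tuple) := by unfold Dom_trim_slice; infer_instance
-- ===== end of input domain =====

-- B replaces A's two boundary-shrinking while loops by one full scan that collects
-- the non-empty indices and takes their extremes (objective: simpler, not faster).

-- ===== PORT A =====

-- _empty(line): shared inner helper of both Pythons
def pvEmpty (line : String) : Bool := line == "" || PySem.Str.strip line == ">"

-- `while slice_start < slice_end and _empty(lines[slice_start]): slice_start += 1`
-- (the index is in range under Pre_; pyGetD's default is never read there)
def pvTrimStart (lines : List String) (s e : Int) : Int :=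
  if h1 : s < e then
    if pvEmpty (PySem.List.pyGetD lines s "") then pvTrimStart lines (s + 1) e
    else s
  else s
termination_by (e - s).toNat
decreasing_by omega

-- `while slice_end > slice_start and _empty(lines[slice_end - 1]): slice_end -= 1`
def pvTrimEnd (lines : List String) (s e : Int) : Int :=
  if h1 : e > s then
    if pvEmpty (PySem.List.pyGetD lines (e - 1) "") then pvTrimEnd lines s (e - 1)
    else e
  else e
termination_by (e - s).toNat
decreasing_by omega

def trim_slice (lines : List String) (slice_tuple : Option (Option Int × Option Int)) : Option (Int × Int) :=
  match slice_tuple with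
  | none => none
  | some (a, b) =>
    let slice_start := a.getD 0
    let slice_end := b.getD (lines.length : Int)
    let slice_start := pvTrimStart lines slice_start slice_end
    let slice_end := pvTrimEnd lines slice_start slice_end
    some (slice_start, slice_end)

-- ===== PORT B =====
def trim_slice_alt (lines : List String) (slice_tuple : Option (Option Int × Option Int)) : Option (Int × Int) :=
  match slice_tuple with
  | none => none
  | some (a, b) =>
    let start := a.getD 0
    let stop := b.getD (lines.length : Int)
    if start ≥ stop then some (start, stop)
    else
      let idxs := (PySem.List.pyRange start stop 1).filter
        (fun i => ! pvEmpty (PySem.List.pyGetD lines i ""))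
      if hne : idxs ≠ [] then some (idxs.head hne, idxs.getLast hne + 1)
      else some (stop, stop)

-- ===== PRECONDITION & SPEC =====
-- Pre_ excludes exactly the inputs where Python A raises IndexError: a non-degenerate
-- clamped slice (start < end) whose endpoints leave the valid index range [-len, len].
def Pre_trim_slice (lines : List String) (slice_tuple : Option (Option Int × Option Int)) : Prop :=
  (match slice_tuple with
   | none => true
   | some (a, b) =>
     let s := a.getD 0
     let e := b.getD (lines.length : Int)
     decide (e ≤ s ∨ (-(lines.length : Int) ≤ s ∧ e ≤ (lines.length : Int)))) = true
instance (lines : List String) (slice_tuple : Option (Option Int × Option Int)) : Decidable (Pre_trim_slice lines slice_tuple) := by unfold Pre_trim_slice; infer_instance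
def pvWitness_trim_slice : List String × (Option (Option Int × Option Int)) :=
  (["", "a", ""], some (some 0, some 3))

def Spec_trim_slice (lines : List String) (slice_tuple : Option (Option Int × Option Int)) (out : Option (Int × Int)) : Prop := out = trim_slice_alt lines slice_tuple
instance (lines : List String) (slice_tuple : Option (Option Int × Option Int)) (out : Option (Int × Int)) : Decidable (Spec_trim_slice lines slice_tuple out) := by unfold Spec_trim_slice; infer_instance

-- ===== CLAIM (what is proved, stated in full; the proofs are below) =====
def Claim_equal_trim_slice : Prop := ∀ (lines : List String) (slice_tuple : Option (Option Int × Option Int)), Dom_trim_slice lines slice_tuple → Pre_trim_slice lines slice_tuple → Spec_trim_slice lines slice_tuple (trim_slice lines slice_tuple)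

-- ===== LEMMAS AND PROOFS =====

-- the non-empty indices in the clamped slice, B's central object
def pvIdxs (lines : List String) (s e : Int) : List Int :=
  (PySem.List.pyRange s e 1).filter (fun i => ! pvEmpty (PySem.List.pyGetD lines i ""))

theorem pvTrimStart_eq (lines : List String) :
    ∀ (n : Nat) (s e : Int), (e - s).toNat = n →
      pvTrimStart lines s e =
        (match pvIdxs lines s e with | [] => max s e | i :: _ => i) ∧
      pvIdxs lines (pvTrimStart lines s e) e = pvIdxs lines s e := by
  intro n
  induction n using Nat.strong_induction_on with
  | _ n ih =>
    intro s e hn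
    by_cases hse : s < e
    · have hcons : PySem.List.pyRange s e 1 = s :: PySem.List.pyRange (s + 1) e 1 :=
        PySem.List.pyRange_one_cons hse
      by_cases hp : pvEmpty (PySem.List.pyGetD lines s "") = true
      · have hF : pvIdxs lines s e = pvIdxs lines (s + 1) e := by
          simp [pvIdxs, hcons, hp]
        have hstep : pvTrimStart lines s e = pvTrimStart lines (s + 1) e := by
          rw [pvTrimStart]; simp [hse, hp]
        obtain ⟨ih1, ih2⟩ := ih (e - (s + 1)).toNat (by omega) (s + 1) e rfl
        refine ⟨?_, ?_⟩
        · rw [hstep, ih1, hF]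
          rcases hI : pvIdxs lines (s + 1) e with _ | ⟨i, rest⟩
          · have h1 : max s e = e := max_eq_right (by omega)
            have h2 : max (s + 1) e = e := max_eq_right (by omega)
            simp [h1, h2]
          · rfl
        · rw [hstep, ih2, hF]
      · have hF : pvIdxs lines s e = s :: pvIdxs lines (s + 1) e := by
          simp [pvIdxs, hcons, hp]
        have hstep : pvTrimStart lines s e = s := by
          rw [pvTrimStart]; simp [hse, hp]
        refine ⟨?_, ?_⟩
        · rw [hstep, hF]
        · rw [hstep]
    · have hstep : pvTrimStart lines s e = s := by
        rw [pvTrimStart]; simp [hse]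
      have hF : pvIdxs lines s e = [] := by
        simp [pvIdxs, PySem.List.pyRange_one_eq_nil (show e ≤ s by omega)]
      refine ⟨?_, ?_⟩
      · rw [hstep, hF]
        exact (max_eq_left (by omega)).symm
      · rw [hstep]

theorem pvTrimEnd_eq (lines : List String) :
    ∀ (n : Nat) (s e : Int), (e - s).toNat = n →
      pvTrimEnd lines s e =
        (match (pvIdxs lines s e).getLast? with | none => min s e | some m => m + 1) := by
  intro n
  induction n using Nat.strong_induction_on with
  | _ n ih =>
    intro s e hn
    by_cases hse : s < e
    · have happ : PySem.List.pyRange s e 1 =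
          PySem.List.pyRange s (e - 1) 1 ++ [e - 1] := by
        have h := PySem.List.pyRange_one_succ_right (a := s) (b := e - 1) (by omega)
        rw [show e - 1 + 1 = e from by omega] at h
        exact h
      by_cases hp : pvEmpty (PySem.List.pyGetD lines (e - 1) "") = true
      · have hF : pvIdxs lines s e = pvIdxs lines s (e - 1) := by
          simp [pvIdxs, happ, List.filter_append, hp]
        have hstep : pvTrimEnd lines s e = pvTrimEnd lines s (e - 1) := by
          rw [pvTrimEnd]; simp [show e > s from hse, hp]
        rw [hstep, ih (e - 1 - s).toNat (by omega) s (e - 1) rfl, hF]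
        rcases hI : (pvIdxs lines s (e - 1)).getLast? with _ | m
        · have h1 : min s (e - 1) = s := min_eq_left (by omega)
          have h2 : min s e = s := min_eq_left (by omega)
          simp [h1, h2]
        · rfl
      · have hF : pvIdxs lines s e = pvIdxs lines s (e - 1) ++ [e - 1] := by
          simp [pvIdxs, happ, List.filter_append, hp]
        have hstep : pvTrimEnd lines s e = e := by
          rw [pvTrimEnd]; simp [show e > s from hse, hp]
        rw [hstep, hF, List.getLast?_concat]
        show e = e - 1 + 1
        omega
    · have hstep : pvTrimEnd lines s e = e := by
        rw [pvTrimEnd]; simp [show ¬ e > s from hse]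
      have hF : pvIdxs lines s e = [] := by
        simp [pvIdxs, PySem.List.pyRange_one_eq_nil (show e ≤ s by omega)]
      rw [hstep, hF]
      simp only [List.getLast?_nil]
      exact (min_eq_right (by omega)).symm

-- ===== VERDICT (by name: the statement is the Claim_ definition above) =====
theorem trim_slice_spec : Claim_equal_trim_slice := by
  intro lines slice_tuple _ hpre
  unfold Spec_trim_slice trim_slice trim_slice_alt
  match slice_tuple with
  | none => rfl
  | some (a, b) =>
    unfold Pre_trim_slice at hpre
    simp only [decide_eq_true_eq] at hpre
    simp only []
    set s := a.getD 0 with hs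
    set e := b.getD (lines.length : Int) with he
    by_cases hdeg : s ≥ e
    · -- degenerate range: A's loops never run, B returns (s, e) unchanged
      rw [if_pos hdeg]
      have h1 : pvTrimStart lines s e = s := by rw [pvTrimStart]; simp [show ¬ s < e by omega]
      have h2 : pvTrimEnd lines s e = e := by rw [pvTrimEnd]; simp [show ¬ e > s by omega]
      rw [h1, h2]
    rw [if_neg hdeg]
    have hle : s ≤ e := by omega
    have hfold : ((PySem.List.pyRange s e 1).filter
        (fun i => ! pvEmpty (PySem.List.pyGetD lines i ""))) = pvIdxs lines s e := rfl
    rw [hfold]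
    obtain ⟨hL1, hL2⟩ := pvTrimStart_eq lines (e - s).toNat s e rfl
    set s' := pvTrimStart lines s e with hs'
    have hR := pvTrimEnd_eq lines (e - s').toNat s' e rfl
    by_cases hne : pvIdxs lines s e = []
    · rw [dif_neg (by simp [hne])]
      have hs'v : s' = e := by rw [hL1, hne]; exact max_eq_right hle
      have hFs' : pvIdxs lines s' e = [] := by rw [hL2, hne]
      have hEnd : pvTrimEnd lines s' e = e := by
        rw [hR, hFs']
        simp only [List.getLast?_nil]
        rw [hs'v]; exact min_self e
      rw [hEnd, hs'v]
    · rw [dif_pos hne]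
      obtain ⟨i0, rest, hI⟩ : ∃ i0 rest, pvIdxs lines s e = i0 :: rest :=
        List.exists_cons_of_ne_nil hne
      have hs'v : s' = i0 := by rw [hL1, hI]
      have hhead : (pvIdxs lines s e).head hne = i0 := by
        simp [hI]
      have hFs' : pvIdxs lines s' e = pvIdxs lines s e := hL2
      have hEnd : pvTrimEnd lines s' e = (pvIdxs lines s e).getLast hne + 1 := by
        rw [hR, hFs', List.getLast?_eq_some_getLast hne]
      rw [hEnd, hs'v, ← hhead]
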